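-- pv_equiv track=rewrite | github.com/ShiroVEVO/Ciencias-de-la-computacion-lll | Compilador/Generador_Codigo_Intermedio/Codigo_intermedio.py | AgregarDirecciones
-- ===== SOURCE A (Python) =====
-- def AgregarDirecciones(Tabla, ArregloEsCero, ArregloSaltos):
--     i = 0
--     j = 0
--     for fila in Tabla:
--         if (fila[1] == "EsCero" and i != len(ArregloEsCero)):
--             fila[4] = ArregloEsCero[i]
--             i += 1
--         elif (fila[1] == "Saltar" and j != len(ArregloSaltos)):
--             fila[4] = ArregloSaltos[j]
--             j += 1
--     return Tabla
-- ===== SOURCE B (Python) =====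
-- def AgregarDirecciones(Tabla, ArregloEsCero, ArregloSaltos):
--     for fila, v in zip((f for f in Tabla if f[1] == "EsCero"), ArregloEsCero):
--         fila[4] = v
--     for fila, v in zip((f for f in Tabla if f[1] == "Saltar"), ArregloSaltos):
--         fila[4] = v
--     return Tabla
-- ===== Notes on version B (the rewrite author's own statement) =====
-- stated objective: alternative
-- what changed: Replaced A's single interleaved pass with two manually maintained counters indexing into the arrays by two independent zip passes, one per key, each pairing the matching rows with its array and stopping when the array runs out.
import Mathlib
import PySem

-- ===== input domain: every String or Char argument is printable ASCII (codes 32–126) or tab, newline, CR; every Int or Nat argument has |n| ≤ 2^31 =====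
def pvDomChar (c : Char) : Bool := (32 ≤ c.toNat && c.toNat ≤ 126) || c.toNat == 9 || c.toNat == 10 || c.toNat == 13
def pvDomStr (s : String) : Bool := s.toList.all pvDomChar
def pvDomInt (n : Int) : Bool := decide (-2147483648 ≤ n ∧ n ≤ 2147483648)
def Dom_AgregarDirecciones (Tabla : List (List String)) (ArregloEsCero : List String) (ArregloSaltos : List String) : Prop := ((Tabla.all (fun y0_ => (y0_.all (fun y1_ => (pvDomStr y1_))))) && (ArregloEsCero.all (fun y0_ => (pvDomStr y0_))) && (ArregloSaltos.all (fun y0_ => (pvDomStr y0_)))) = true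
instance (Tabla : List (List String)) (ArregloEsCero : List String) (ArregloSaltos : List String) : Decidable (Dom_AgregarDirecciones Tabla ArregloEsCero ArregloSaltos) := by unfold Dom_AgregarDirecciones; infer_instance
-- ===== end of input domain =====

-- B replaces A's single interleaved pass with two explicit counters by two independent
-- zip passes (objective: alternative decomposition, same O(n) cost). Both Pythons mutate
-- the rows of Tabla in place in exactly the same way; the ports model the returned table.

-- fila[1] ported as a total read; exact under Pre_ (every row has length ≥ 2, so the
-- default "" is never used). Shared notation for both ports.
def pyCol (fila : List String) (k : Nat) : String := fila.getD k ""

-- ===== PORT A =====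
-- ArregloEsCero[i] / ArregloSaltos[j] ported as `getD`; exact under Pre_ because the
-- guard `i ≠ len` (with i counting up from 0) keeps the index in range at every use.
-- `fila[4] = v` is ported as `fila.set 4 v`; exact under Pre_ (assigned rows have length ≥ 5).
def AgregarDirecciones.go (es sa : List String) (i j : Nat) : List (List String) → List (List String)
  | [] => []
  | fila :: rest =>
    if pyCol fila 1 = "EsCero" ∧ i ≠ es.length then
      fila.set 4 (es.getD i "") :: AgregarDirecciones.go es sa (i + 1) j rest
    else if pyCol fila 1 = "Saltar" ∧ j ≠ sa.length then
      fila.set 4 (sa.getD j "") :: AgregarDirecciones.go es sa i (j + 1) rest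
    else
      fila :: AgregarDirecciones.go es sa i j rest

def AgregarDirecciones (Tabla : List (List String)) (ArregloEsCero : List String) (ArregloSaltos : List String) : List (List String) :=
  AgregarDirecciones.go ArregloEsCero ArregloSaltos 0 0 Tabla

-- ===== PORT B =====
-- One pass per key: `fillZip key vals tabla` is `for fila, v in zip((f for f in tabla
-- if f[1] == key), vals): fila[4] = v` — it walks tabla, consumes one value of vals at
-- each row whose column 1 equals key, and stops (leaving the rest of tabla untouched)
-- when vals runs out, exactly as zip does.
def fillZip (key : String) : List String → List (List String) → List (List String)
  | _, [] => []
  | [], tabla => tabla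
  | v :: vs, fila :: rest =>
    if pyCol fila 1 = key then fila.set 4 v :: fillZip key vs rest
    else fila :: fillZip key (v :: vs) rest

def AgregarDirecciones_alt (Tabla : List (List String)) (ArregloEsCero : List String) (ArregloSaltos : List String) : List (List String) :=
  fillZip "Saltar" ArregloSaltos (fillZip "EsCero" ArregloEsCero Tabla)

-- ===== PRECONDITION & SPEC =====
-- Exactly the inputs on which Python A returns normally: every row must support fila[1]
-- (length ≥ 2), and every row that actually receives an assignment fila[4] = … — i.e. each
-- of the first len(ArregloEsCero) rows keyed "EsCero" and first len(ArregloSaltos) rows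
-- keyed "Saltar" — must have length ≥ 5; otherwise A raises IndexError.
def Pre_AgregarDirecciones (Tabla : List (List String)) (ArregloEsCero : List String) (ArregloSaltos : List String) : Prop :=
  (∀ fila ∈ Tabla, 2 ≤ fila.length) ∧
  (∀ fila ∈ (Tabla.filter (fun f => f.getD 1 "" = "EsCero")).take ArregloEsCero.length, 5 ≤ fila.length) ∧
  (∀ fila ∈ (Tabla.filter (fun f => f.getD 1 "" = "Saltar")).take ArregloSaltos.length, 5 ≤ fila.length)

instance (Tabla : List (List String)) (ArregloEsCero : List String) (ArregloSaltos : List String) : Decidable (Pre_AgregarDirecciones Tabla ArregloEsCero ArregloSaltos) := by unfold Pre_AgregarDirecciones; infer_instance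

def pvWitness_AgregarDirecciones : List (List String) × List String × List String :=
  ([["t0", "EsCero", "a", "b", "_"], ["t1", "Saltar", "c", "d", "_"], ["t2", "nop"]], ["L0"], ["L7"])

def Spec_AgregarDirecciones (Tabla : List (List String)) (ArregloEsCero : List String) (ArregloSaltos : List String) (out : List (List String)) : Prop := out = AgregarDirecciones_alt Tabla ArregloEsCero ArregloSaltos
instance (Tabla : List (List String)) (ArregloEsCero : List String) (ArregloSaltos : List String) (out : List (List String)) : Decidable (Spec_AgregarDirecciones Tabla ArregloEsCero ArregloSaltos out) := by unfold Spec_AgregarDirecciones; infer_instance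

-- ===== CLAIM (what is proved, stated in full; the proofs are below) =====
def Claim_equal_AgregarDirecciones : Prop := ∀ (Tabla : List (List String)) (ArregloEsCero : List String) (ArregloSaltos : List String), Dom_AgregarDirecciones Tabla ArregloEsCero ArregloSaltos → Pre_AgregarDirecciones Tabla ArregloEsCero ArregloSaltos → Spec_AgregarDirecciones Tabla ArregloEsCero ArregloSaltos (AgregarDirecciones Tabla ArregloEsCero ArregloSaltos)

-- ===== LEMMAS AND PROOFS =====

-- column 1 is untouched by an assignment to column 4
theorem pyCol_one_set_four (fila : List String) (v : String) :
    pyCol (fila.set 4 v) 1 = pyCol fila 1 := by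
  simp [pyCol, List.getD, List.getElem?_set_ne]

-- a pass with no values left changes nothing
theorem fillZip_nil_vals (key : String) (t : List (List String)) :
    fillZip key [] t = t := by
  cases t <;> rfl

-- list-consuming reformulation of A's counter loop
def goPairs : List String → List String → List (List String) → List (List String)
  | _, _, [] => []
  | es, sa, fila :: rest =>
    if pyCol fila 1 = "EsCero" then
      match es with
      | v :: vs => fila.set 4 v :: goPairs vs sa rest
      | [] => fila :: goPairs [] sa rest
    else if pyCol fila 1 = "Saltar" then
      match sa with
      | w :: ws => fila.set 4 w :: goPairs es ws rest
      | [] => fila :: goPairs es [] rest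
    else fila :: goPairs es sa rest

-- small-step equations used to drive the rewriting below
theorem go_cons_es (es sa : List String) (i j : Nat) (fila : List String) (rest : List (List String))
    (hE : pyCol fila 1 = "EsCero") (hi : ¬ i = es.length) :
    AgregarDirecciones.go es sa i j (fila :: rest)
      = fila.set 4 (es.getD i "") :: AgregarDirecciones.go es sa (i + 1) j rest := by
  simp [AgregarDirecciones.go, hE, hi]

theorem go_cons_sa (es sa : List String) (i j : Nat) (fila : List String) (rest : List (List String))
    (hE : ¬ pyCol fila 1 = "EsCero") (hS : pyCol fila 1 = "Saltar") (hj : ¬ j = sa.length) :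
    AgregarDirecciones.go es sa i j (fila :: rest)
      = fila.set 4 (sa.getD j "") :: AgregarDirecciones.go es sa i (j + 1) rest := by
  simp [AgregarDirecciones.go, hE, hS, hj]

theorem goPairs_cons_es (v : String) (vs sa : List String) (fila : List String) (rest : List (List String))
    (hE : pyCol fila 1 = "EsCero") :
    goPairs (v :: vs) sa (fila :: rest) = fila.set 4 v :: goPairs vs sa rest := by
  simp [goPairs, hE]

theorem goPairs_cons_sa (es : List String) (w : String) (ws : List String) (fila : List String) (rest : List (List String))
    (hE : ¬ pyCol fila 1 = "EsCero") (hS : pyCol fila 1 = "Saltar") :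
    goPairs es (w :: ws) (fila :: rest) = fila.set 4 w :: goPairs es ws rest := by
  simp [goPairs, hE, hS]

theorem go_eq_goPairs (es sa : List String) (t : List (List String)) :
    ∀ i j, i ≤ es.length → j ≤ sa.length →
      AgregarDirecciones.go es sa i j t = goPairs (es.drop i) (sa.drop j) t := by
  induction t with
  | nil => intro i j _ _; rfl
  | cons fila rest ih =>
    intro i j hi hj
    by_cases hE : pyCol fila 1 = "EsCero"
    · by_cases hilen : i = es.length
      · have hS : ¬ pyCol fila 1 = "Saltar" := by rw [hE]; decide
        subst hilen
        have h := ih es.length j le_rfl hj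
        simp [AgregarDirecciones.go, goPairs, hE, hS, List.drop_length, h]
      · have hlt : i < es.length := lt_of_le_of_ne hi hilen
        have hdrop : es.drop i = es[i] :: es.drop (i + 1) :=
          (List.getElem_cons_drop hlt).symm
        have hgetD : es.getD i "" = es[i] := List.getD_eq_getElem es "" hlt
        rw [go_cons_es es sa i j fila rest hE hilen, hgetD, hdrop,
          goPairs_cons_es _ _ _ _ _ hE, ih (i + 1) j hlt hj]
    · by_cases hS : pyCol fila 1 = "Saltar"
      · by_cases hjlen : j = sa.length
        · subst hjlen
          have h := ih i sa.length hi le_rfl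
          simp [AgregarDirecciones.go, goPairs, hE, hS, List.drop_length, h]
        · have hlt : j < sa.length := lt_of_le_of_ne hj hjlen
          have hdrop : sa.drop j = sa[j] :: sa.drop (j + 1) :=
            (List.getElem_cons_drop hlt).symm
          have hgetD : sa.getD j "" = sa[j] := List.getD_eq_getElem sa "" hlt
          rw [go_cons_sa es sa i j fila rest hE hS hjlen, hgetD, hdrop,
            goPairs_cons_sa _ _ _ _ _ hE hS, ih i (j + 1) hi hlt]
      · simp [AgregarDirecciones.go, goPairs, hE, hS, ih i j hi hj]

theorem goPairs_eq_fillZip (t : List (List String)) :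
    ∀ es sa, goPairs es sa t = fillZip "Saltar" sa (fillZip "EsCero" es t) := by
  induction t with
  | nil => intro es sa; cases es <;> cases sa <;> rfl
  | cons fila rest ih =>
    intro es sa
    by_cases hE : pyCol fila 1 = "EsCero"
    · have hS : ¬ pyCol fila 1 = "Saltar" := by rw [hE]; decide
      cases es with
      | nil =>
        cases sa with
        | nil => simp [goPairs, fillZip_nil_vals, hE, hS, ih]
        | cons w ws => simp [goPairs, fillZip, hE, hS, ih, fillZip_nil_vals]
      | cons v vs =>
        have hS' : ¬ pyCol (fila.set 4 v) 1 = "Saltar" := by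
          rw [pyCol_one_set_four, hE]; decide
        cases sa with
        | nil => simp [goPairs, fillZip, hE, hS', ih, fillZip_nil_vals]
        | cons w ws => simp [goPairs, fillZip, hE, hS', ih]
    · by_cases hS : pyCol fila 1 = "Saltar"
      · cases sa with
        | nil =>
          cases es with
          | nil => simp [goPairs, fillZip_nil_vals, hE, hS, ih]
          | cons v vs => simp [goPairs, fillZip, hE, hS, ih, fillZip_nil_vals]
        | cons w ws =>
          cases es with
          | nil => simp [goPairs, fillZip, hE, hS, ih, fillZip_nil_vals]
          | cons v vs => simp [goPairs, fillZip, hE, hS, ih]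
      · cases es with
        | nil =>
          cases sa with
          | nil => simp [goPairs, fillZip_nil_vals, hE, hS, ih]
          | cons w ws => simp [goPairs, fillZip, hE, hS, ih, fillZip_nil_vals]
        | cons v vs =>
          cases sa with
          | nil => simp [goPairs, fillZip, hE, hS, ih, fillZip_nil_vals]
          | cons w ws => simp [goPairs, fillZip, hE, hS, ih]

-- ===== VERDICT (by name: the statement is the Claim_ definition above) =====
theorem AgregarDirecciones_spec : Claim_equal_AgregarDirecciones := by
  intro Tabla es sa _ _
  unfold Spec_AgregarDirecciones AgregarDirecciones AgregarDirecciones_alt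
  rw [go_eq_goPairs es sa Tabla 0 0 (Nat.zero_le _) (Nat.zero_le _)]
  simpa using goPairs_eq_fillZip Tabla es sa
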